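-- pv_equiv track=rewrite | github.com/paiml/depyler | examples/hard_realworld_scheduler.py | run_scheduler
-- ===== SOURCE A (Python) =====
-- def insert_sorted(queue: list[list[int]], tid: int, pri: int, dl: int, dur: int) -> int:
--     """Insert task maintaining priority order (higher first). Returns queue size."""
--     insert_pos: int = len(queue)
--     idx: int = 0
--     while idx < len(queue):
--         if pri > queue[idx][1]:
--             insert_pos = idx
--             idx = len(queue)
--         else:
--             idx = idx + 1
--     new_entry: list[int] = [tid, pri, dl, dur, 0]
--     queue.append(new_entry)
--     pos: int = len(queue) - 1
--     while pos > insert_pos: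
--         queue[pos] = queue[pos - 1]
--         pos = pos - 1
--     queue[insert_pos] = [tid, pri, dl, dur, 0]
--     return len(queue)
--
-- def pop_highest(queue: list[list[int]]) -> list[int]:
--     """Remove and return highest priority task."""
--     if len(queue) == 0:
--         return [-1, -1, -1, -1, -1]
--     tid: int = queue[0][0]
--     pri: int = queue[0][1]
--     dl: int = queue[0][2]
--     dur: int = queue[0][3]
--     stat: int = queue[0][4]
--     idx: int = 0
--     while idx < len(queue) - 1:
--         queue[idx] = queue[idx + 1]
--         idx = idx + 1
--     queue.pop()
--     return [tid, pri, dl, dur, stat]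
--
-- def execute_task(task_id: int, task_deadline: int, task_duration: int, current_time: int) -> list[int]:
--     """Execute a task. Returns [task_id, finish_time, status]."""
--     finish_time: int = current_time + task_duration
--     if current_time > task_deadline:
--         return [task_id, finish_time, 3]
--     return [task_id, finish_time, 2]
--
-- def run_scheduler(task_ids: list[int], priorities: list[int], deadlines: list[int], durations: list[int]) -> list[list[int]]:
--     """Run all tasks through scheduler. Returns execution results."""
--     queue: list[list[int]] = []
--     idx: int = 0
--     while idx < len(task_ids):
--         insert_sorted(queue, task_ids[idx], priorities[idx], deadlines[idx], durations[idx])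
--         idx = idx + 1
--     results: list[list[int]] = []
--     current_time: int = 0
--     while len(queue) > 0:
--         task: list[int] = pop_highest(queue)
--         res: list[int] = execute_task(task[0], task[2], task[3], current_time)
--         current_time = res[1]
--         results.append(res)
--     return results
-- ===== SOURCE B (Python) =====
-- def run_scheduler(task_ids: list[int], priorities: list[int], deadlines: list[int], durations: list[int]) -> list[list[int]]:
--     """Run all tasks through scheduler. Returns execution results."""
--     tasks = sorted(zip(task_ids, priorities, deadlines, durations), key=lambda t: -t[1])
--     results: list[list[int]] = []
--     current_time = 0
--     for tid, pri, dl, dur in tasks: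
--         finish = current_time + dur
--         results.append([tid, finish, 3 if current_time > dl else 2])
--         current_time = finish
--     return results
-- ===== Notes on version B (the rewrite author's own statement) =====
-- stated objective: faster
-- what changed: Replaces A's O(n^2) hand-rolled insert-into-sorted-queue and element-shifting pop loop with one stable sorted() by descending priority over zipped task tuples followed by a single accumulating pass.
import Mathlib
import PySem

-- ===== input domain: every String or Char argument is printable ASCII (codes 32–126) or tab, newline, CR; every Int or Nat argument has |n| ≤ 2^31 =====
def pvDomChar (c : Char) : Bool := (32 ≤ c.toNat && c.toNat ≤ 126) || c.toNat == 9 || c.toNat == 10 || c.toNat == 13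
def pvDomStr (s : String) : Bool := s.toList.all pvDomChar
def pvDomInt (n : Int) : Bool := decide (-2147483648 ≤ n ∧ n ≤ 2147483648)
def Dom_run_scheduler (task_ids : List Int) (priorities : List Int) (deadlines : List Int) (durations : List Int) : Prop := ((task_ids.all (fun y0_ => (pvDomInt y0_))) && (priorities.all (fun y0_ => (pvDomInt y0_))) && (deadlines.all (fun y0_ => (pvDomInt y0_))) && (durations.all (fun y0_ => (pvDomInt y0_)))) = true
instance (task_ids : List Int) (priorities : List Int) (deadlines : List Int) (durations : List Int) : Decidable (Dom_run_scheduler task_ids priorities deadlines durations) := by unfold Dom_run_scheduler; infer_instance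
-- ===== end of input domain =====

-- B replaces A's quadratic insert-into-priority-queue and shifting pop loop by one stable
-- library sort (descending priority) followed by a single accumulating pass; return values
-- agree on Pre_ (A mutates only its local queue, so no caller-visible side effects differ).

-- ===== PORT A =====
-- pvGet xs i = xs[i]; every access in A is on a 5-element entry (or a 3-element result)
-- with indices 0..4, always in range, so defaulting the impossible `none` to 0 is exact.
def pvGet (xs : List Int) (i : Int) : Int := (PySem.List.pyGet? xs i).getD 0

-- the first while of insert_sorted: insert_pos = first idx with pri > queue[idx][1], else len(queue)
def insertPosA (pri : Int) : List (List Int) → Nat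
  | [] => 0
  | q :: rest => if pri > pvGet q 1 then 0 else insertPosA pri rest + 1

-- append + shift-right + overwrite at insert_pos = insert the new entry at insert_pos
def insert_sortedA (queue : List (List Int)) (tid pri dl dur : Int) : List (List Int) :=
  let pos := insertPosA pri queue
  queue.take pos ++ [[tid, pri, dl, dur, 0]] ++ queue.drop pos

def execute_taskA (task_id task_deadline task_duration current_time : Int) : List Int :=
  let finish_time := current_time + task_duration
  if current_time > task_deadline then [task_id, finish_time, 3]
  else [task_id, finish_time, 2]

-- the first while of run_scheduler: idx walks the four lists in parallel (stops when
-- task_ids is exhausted; Python raises if another list is shorter — excluded by Pre_)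
def buildQueueA : List Int → List Int → List Int → List Int → List (List Int) → List (List Int)
  | t :: ts, p :: ps, d :: ds, u :: us, q => buildQueueA ts ps ds us (insert_sortedA q t p d u)
  | _, _, _, _, q => q

-- the second while: pop_highest returns queue[0] and drops it (the shift loop + pop())
def runQueueA : List (List Int) → Int → List (List Int)
  | [], _ => []
  | task :: rest, current_time =>
    let res := execute_taskA (pvGet task 0) (pvGet task 2) (pvGet task 3) current_time
    res :: runQueueA rest (pvGet res 1)

def run_scheduler (task_ids : List Int) (priorities : List Int) (deadlines : List Int) (durations : List Int) : List (List Int) :=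
  runQueueA (buildQueueA task_ids priorities deadlines durations []) 0

-- ===== PORT B =====
-- zip(task_ids, priorities, deadlines, durations) as nested pairs; stable sort by -priority;
-- one fold accumulating (results, current_time)
def run_scheduler_alt (task_ids : List Int) (priorities : List Int) (deadlines : List Int) (durations : List Int) : List (List Int) :=
  let tasks := PySem.List.sorted (task_ids.zip (priorities.zip (deadlines.zip durations))) (fun t => -t.2.1) false
  (tasks.foldl (fun (st : List (List Int) × Int) t =>
      let finish := st.2 + t.2.2.2
      (st.1 ++ [[t.1, finish, if st.2 > t.2.2.1 then (3 : Int) else 2]], finish)) ([], 0)).1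

-- ===== PRECONDITION & SPEC =====
-- Pre_ excludes exactly the inputs where Python A raises IndexError: priorities/deadlines/
-- durations shorter than task_ids (extra trailing elements of those lists are fine).
def Pre_run_scheduler (task_ids : List Int) (priorities : List Int) (deadlines : List Int) (durations : List Int) : Prop :=
  task_ids.length ≤ priorities.length ∧ task_ids.length ≤ deadlines.length ∧ task_ids.length ≤ durations.length
instance (task_ids : List Int) (priorities : List Int) (deadlines : List Int) (durations : List Int) : Decidable (Pre_run_scheduler task_ids priorities deadlines durations) := by unfold Pre_run_scheduler; infer_instance

def pvWitness_run_scheduler : List Int × List Int × List Int × List Int := ([1, 2, 3], [1, 3, 1], [4, 2, 9], [3, 2, 1])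

def Spec_run_scheduler (task_ids : List Int) (priorities : List Int) (deadlines : List Int) (durations : List Int) (out : List (List Int)) : Prop := out = run_scheduler_alt task_ids priorities deadlines durations
instance (task_ids : List Int) (priorities : List Int) (deadlines : List Int) (durations : List Int) (out : List (List Int)) : Decidable (Spec_run_scheduler task_ids priorities deadlines durations out) := by unfold Spec_run_scheduler; infer_instance

-- ===== CLAIM (what is proved, stated in full; the proofs are below) =====
def Claim_equal_run_scheduler : Prop := ∀ (task_ids : List Int) (priorities : List Int) (deadlines : List Int) (durations : List Int), Dom_run_scheduler task_ids priorities deadlines durations → Pre_run_scheduler task_ids priorities deadlines durations → Spec_run_scheduler task_ids priorities deadlines durations (run_scheduler task_ids priorities deadlines durations)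

-- ===== LEMMAS AND PROOFS =====

-- the queue entry A builds from one zipped task tuple
def pvEntry (t : Int × Int × Int × Int) : List Int := [t.1, t.2.1, t.2.2.1, t.2.2.2, 0]

-- B's sort comparator, as insertBy's `before` predicate
def pvBef (a b : Int × Int × Int × Int) : Bool := decide ((-a.2.1 : Int) < -b.2.1)

lemma insert_sortedA_entry (x : Int × Int × Int × Int) (acc : List (Int × Int × Int × Int)) :
    insert_sortedA (acc.map pvEntry) x.1 x.2.1 x.2.2.1 x.2.2.2
      = (PySem.List.insertBy pvBef x acc).map pvEntry := by
  induction acc with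
  | nil => rfl
  | cons q rest ih =>
    have hget : pvGet (pvEntry q) 1 = q.2.1 := by
      simp [pvGet, pvEntry, PySem.List.pyGet?, PySem.List.pyIdx?]
    by_cases h : q.2.1 < x.2.1
    · have hb : pvBef x q = true := by simp [pvBef]; omega
      simp [insert_sortedA, insertPosA, h, PySem.List.insertBy, hb, pvEntry, pvGet,
        PySem.List.pyGet?, PySem.List.pyIdx?]
    · have hb : pvBef x q = false := by simp [pvBef]; omega
      have h' : ¬ x.2.1 > q.2.1 := h
      simp only [insert_sortedA, insertPosA, hget, if_neg h', List.map_cons,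
        PySem.List.insertBy, hb, Bool.false_eq_true, if_false,
        List.take_succ_cons, List.drop_succ_cons, List.cons_append]
      have := ih
      simp only [insert_sortedA] at this
      rw [this]

lemma buildQueueA_eq_foldl (ts ps ds us : List Int) (acc : List (Int × Int × Int × Int)) :
    buildQueueA ts ps ds us (acc.map pvEntry)
      = ((ts.zip (ps.zip (ds.zip us))).foldl (fun a x => PySem.List.insertBy pvBef x a) acc).map pvEntry := by
  induction ts generalizing ps ds us acc with
  | nil => simp [buildQueueA]
  | cons t ts ih =>
    cases ps with
    | nil => simp [buildQueueA]
    | cons p ps =>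
      cases ds with
      | nil => simp [buildQueueA]
      | cons d ds =>
        cases us with
        | nil => simp [buildQueueA]
        | cons u us =>
          have h := insert_sortedA_entry (t, p, d, u) acc
          simp only [List.zip_cons_cons, List.foldl_cons, buildQueueA]
          rw [h, ih]

lemma runQueueA_foldl (l : List (Int × Int × Int × Int)) (t : Int) (acc : List (List Int)) :
    (l.foldl (fun (st : List (List Int) × Int) x =>
        let finish := st.2 + x.2.2.2
        (st.1 ++ [[x.1, finish, if st.2 > x.2.2.1 then (3 : Int) else 2]], finish)) (acc, t)).1
      = acc ++ runQueueA (l.map pvEntry) t := by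
  induction l generalizing t acc with
  | nil => simp [runQueueA]
  | cons x l ih =>
    have g0 : pvGet (pvEntry x) 0 = x.1 := by
      simp [pvGet, pvEntry, PySem.List.pyGet?, PySem.List.pyIdx?]
    have g2 : pvGet (pvEntry x) 2 = x.2.2.1 := by
      simp [pvGet, pvEntry, PySem.List.pyGet?, PySem.List.pyIdx?]
    have g3 : pvGet (pvEntry x) 3 = x.2.2.2 := by
      simp [pvGet, pvEntry, PySem.List.pyGet?, PySem.List.pyIdx?]
    have hres : execute_taskA x.1 x.2.2.1 x.2.2.2 t
        = [x.1, t + x.2.2.2, if t > x.2.2.1 then (3 : Int) else 2] := by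
      unfold execute_taskA
      split_ifs <;> rfl
    have hfin : pvGet [x.1, t + x.2.2.2, if t > x.2.2.1 then (3 : Int) else 2] 1 = t + x.2.2.2 := by
      simp [pvGet, PySem.List.pyGet?, PySem.List.pyIdx?]
    simp only [List.foldl_cons, List.map_cons, runQueueA, g0, g2, g3, hres, hfin]
    rw [ih]
    simp

-- ===== VERDICT (by name: the statement is the Claim_ definition above) =====
theorem run_scheduler_spec : Claim_equal_run_scheduler := by
  intro task_ids priorities deadlines durations _ _
  unfold Spec_run_scheduler run_scheduler run_scheduler_alt
  rw [PySem.List.sorted_eq_foldl_insertBy]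
  have hb : (fun (a b : Int × Int × Int × Int) => decide ((fun t : Int × Int × Int × Int => -t.2.1) a < (fun t : Int × Int × Int × Int => -t.2.1) b)) = pvBef := by
    funext a b; rfl
  rw [hb]
  have hbuild := buildQueueA_eq_foldl task_ids priorities deadlines durations []
  simp only [List.map_nil] at hbuild
  rw [hbuild]
  have hrun := runQueueA_foldl
    ((task_ids.zip (priorities.zip (deadlines.zip durations))).foldl
      (fun a x => PySem.List.insertBy pvBef x a) []) 0 []
  simp only [List.nil_append] at hrun
  exact hrun.symm
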